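-- pv_equiv track=rewrite | github.com/hfjelstad/Profile_Documentation_v2 | XSD 2.0/scripts/xsd_analyzer_v5.py | _get_prefix_for_namespace
-- ===== SOURCE A (Python) =====
-- from typing import Dict, Set, List, Tuple, Optional, Any
--
-- def _get_prefix_for_namespace(ns_map: Dict[str, str], namespace: str) -> Optional[str]:
--     """Get the prefix for a given namespace URI."""
--     for prefix, uri in ns_map.items():
--         if uri == namespace:
--             # Prefer named prefixes over default namespace
--             if prefix:
--                 return prefix
--
--     # If no named prefix found, check if it's the default namespace
--     for prefix, uri in ns_map.items():
--         if uri == namespace: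
--             return prefix if prefix else 'default'
--
--     return None
-- ===== SOURCE B (Python) =====
-- from typing import Dict, Optional
--
-- def _get_prefix_for_namespace(ns_map: Dict[str, str], namespace: str) -> Optional[str]:
--     """Get the prefix for a given namespace URI (single pass)."""
--     found_default = False
--     for prefix, uri in ns_map.items():
--         if uri == namespace:
--             if prefix:
--                 return prefix
--             found_default = True
--     return 'default' if found_default else None
-- ===== Notes on version B (the rewrite author's own statement) =====
-- stated objective: simpler
-- what changed: Replaces A's two sequential scans of ns_map with a single pass that returns the first named prefix immediately and tracks an empty-prefix match in a boolean flag, returning 'default' after the loop if set.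
import Mathlib
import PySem

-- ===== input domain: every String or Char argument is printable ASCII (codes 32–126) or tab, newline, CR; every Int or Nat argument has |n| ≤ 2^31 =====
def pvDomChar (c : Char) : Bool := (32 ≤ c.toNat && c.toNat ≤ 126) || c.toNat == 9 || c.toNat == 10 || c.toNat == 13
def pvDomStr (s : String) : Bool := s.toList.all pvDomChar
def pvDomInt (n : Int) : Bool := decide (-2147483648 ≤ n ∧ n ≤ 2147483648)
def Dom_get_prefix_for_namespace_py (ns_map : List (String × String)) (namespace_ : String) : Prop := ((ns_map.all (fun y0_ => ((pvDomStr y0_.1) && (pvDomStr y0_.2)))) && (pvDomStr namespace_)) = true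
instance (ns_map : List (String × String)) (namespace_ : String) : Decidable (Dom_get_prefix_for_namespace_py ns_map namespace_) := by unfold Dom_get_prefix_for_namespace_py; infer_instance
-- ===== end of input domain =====

-- ===== PORT A =====
-- first loop of A: return the first entry whose uri matches and whose prefix is truthy (nonempty)
def pvScan1 (l : List (String × String)) (namespace_ : String) : Option String :=
  match l with
  | [] => none
  | (prefix_, uri) :: t =>
      if uri == namespace_ then
        if prefix_ ≠ "" then some prefix_ else pvScan1 t namespace_
      else pvScan1 t namespace_

-- second loop of A: on the first matching entry, return the prefix if truthy else "default"
def pvScan2 (l : List (String × String)) (namespace_ : String) : Option String :=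
  match l with
  | [] => none
  | (prefix_, uri) :: t =>
      if uri == namespace_ then some (if prefix_ ≠ "" then prefix_ else "default")
      else pvScan2 t namespace_

def get_prefix_for_namespace_py (ns_map : List (String × String)) (namespace_ : String) : Option String :=
  match pvScan1 ns_map namespace_ with
  | some p => some p
  | none => pvScan2 ns_map namespace_

-- ===== PORT B =====
-- B: one pass; return first named match at once, remember an empty-prefix match in found_default
def pvGo (l : List (String × String)) (namespace_ : String) (found_default : Bool) : Option String :=
  match l with
  | [] => if found_default then some "default" else none
  | (prefix_, uri) :: t =>
      if uri == namespace_ then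
        if prefix_ ≠ "" then some prefix_ else pvGo t namespace_ true
      else pvGo t namespace_ found_default

def get_prefix_for_namespace_py_alt (ns_map : List (String × String)) (namespace_ : String) : Option String :=
  pvGo ns_map namespace_ false

-- ===== PRECONDITION & SPEC =====
def Spec_get_prefix_for_namespace_py (ns_map : List (String × String)) (namespace_ : String) (out : Option String) : Prop := out = get_prefix_for_namespace_py_alt ns_map namespace_
instance (ns_map : List (String × String)) (namespace_ : String) (out : Option String) : Decidable (Spec_get_prefix_for_namespace_py ns_map namespace_ out) := by unfold Spec_get_prefix_for_namespace_py; infer_instance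

-- ===== CLAIM (what is proved, stated in full; the proofs are below) =====
def Claim_equal_get_prefix_for_namespace_py : Prop := ∀ (ns_map : List (String × String)) (namespace_ : String), Dom_get_prefix_for_namespace_py ns_map namespace_ → Spec_get_prefix_for_namespace_py ns_map namespace_ (get_prefix_for_namespace_py ns_map namespace_)

-- ===== LEMMAS AND PROOFS =====

-- ===== VERDICT (by name: the statement is the Claim_ definition above) =====
lemma pvGo_eq (l : List (String × String)) (namespace_ : String) (flag : Bool) :
    pvGo l namespace_ flag =
      match pvScan1 l namespace_ with
      | some p => some p
      | none => if flag then some "default" else pvScan2 l namespace_ := by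
  induction l generalizing flag with
  | nil => simp [pvGo, pvScan1, pvScan2]
  | cons h t ih =>
    obtain ⟨p, u⟩ := h
    by_cases hu : u == namespace_
    · by_cases hp : p ≠ ""
      · simp [pvGo, pvScan1, hu, hp]
      · simp [pvGo, pvScan1, pvScan2, hu, hp, ih]
    · simp [pvGo, pvScan1, pvScan2, hu, ih]

theorem get_prefix_for_namespace_py_spec : Claim_equal_get_prefix_for_namespace_py := by
  intro ns_map namespace_ _
  unfold Spec_get_prefix_for_namespace_py get_prefix_for_namespace_py get_prefix_for_namespace_py_alt
  rw [pvGo_eq]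
  cases pvScan1 ns_map namespace_ <;> simp
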